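-- pv_equiv track=rewrite | github.com/DAYhaveyou/update_python3_files | for_all_species_manage.py | deal_dir_filename
-- ===== SOURCE A (Python) =====
-- def deal_dir_filename(name):
--     file_name = ''
--
--     for i in name:
--         if i != '/' and i != '\\':
--             file_name += i
--         else:
--             file_name = ''
--     return file_name
-- ===== SOURCE B (Python) =====
-- def deal_dir_filename(name):
--     parts = name.replace('\\', '/').split('/')
--     return parts[-1]
-- ===== Notes on version B (the rewrite author's own statement) =====
-- stated objective: idiomatic
-- what changed: B normalizes backslash separators, splits the whole string into its component list and returns the last element, instead of A's char-by-char scan that resets a growing accumulator at each separator.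
import Mathlib
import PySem

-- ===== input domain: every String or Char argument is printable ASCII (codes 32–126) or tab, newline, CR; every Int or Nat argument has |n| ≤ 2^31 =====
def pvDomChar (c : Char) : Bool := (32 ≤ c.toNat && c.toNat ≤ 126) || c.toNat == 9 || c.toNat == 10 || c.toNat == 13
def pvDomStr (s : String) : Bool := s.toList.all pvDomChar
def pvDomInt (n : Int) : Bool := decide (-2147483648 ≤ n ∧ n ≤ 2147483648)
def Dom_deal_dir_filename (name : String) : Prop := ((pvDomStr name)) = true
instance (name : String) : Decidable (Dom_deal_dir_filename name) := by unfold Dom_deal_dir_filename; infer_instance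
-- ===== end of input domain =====

-- B replaces A's forward accumulator-resetting scan by "normalize '\' to '/', split into the full
-- component list, take the last component" (idiomatic; same return value everywhere).

-- ===== PORT A =====
def deal_dir_filename (name : String) : String :=
  String.ofList
    (name.toList.foldl
      (fun file_name i => if i ≠ '/' ∧ i ≠ '\\' then file_name ++ [i] else []) [])

-- ===== PORT B =====
def deal_dir_filename_alt (name : String) : String :=
  let parts : List (List Char) :=
    PySem.Chars.splitOn (PySem.Chars.replace name.toList ['\\'] ['/']) ['/']
  -- '/' is a nonempty separator, so .split('/') never raises and always returns a nonempty
  -- list; hence parts[-1] never raises and the .getD default is unreachable.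
  String.ofList ((PySem.List.pyGet? parts (-1)).getD [])

-- ===== PRECONDITION & SPEC =====
def Spec_deal_dir_filename (name : String) (out : String) : Prop := out = deal_dir_filename_alt name
instance (name : String) (out : String) : Decidable (Spec_deal_dir_filename name out) := by unfold Spec_deal_dir_filename; infer_instance

-- ===== CLAIM (what is proved, stated in full; the proofs are below) =====
def Claim_equal_deal_dir_filename : Prop := ∀ (name : String), Dom_deal_dir_filename name → Spec_deal_dir_filename name (deal_dir_filename name)

-- ===== LEMMAS AND PROOFS =====

-- the char map performed by name.replace('\\','/')
def pvMapSlash (c : Char) : Char := if c = '\\' then '/' else c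

-- reference splitter on an already-normalized list (single separator '/')
def pvSplit1 : List Char → List Char → List (List Char)
  | [], cur => [cur.reverse]
  | c :: rest, cur =>
      if c = '/' then cur.reverse :: pvSplit1 rest [] else pvSplit1 rest (c :: cur)

lemma pvReplace_go (l acc : List Char) (fuel : Nat) (h : l.length ≤ fuel) :
    PySem.Chars.replace.go ['\\'] ['/'] fuel l acc = acc.reverse ++ l.map pvMapSlash := by
  induction l generalizing acc fuel with
  | nil => cases fuel <;> simp [PySem.Chars.replace.go]
  | cons c rest ih =>
      cases fuel with
      | zero => simp at h
      | succ fuel =>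
          simp only [PySem.Chars.replace.go, List.isPrefixOf]
          by_cases hc : c = '\\'
          · simp [hc, ih rest.length (by simp_all; omega) (le_refl _)]
            rw [ih _ _ (by simpa using Nat.le_of_succ_le_succ h)]
            simp [pvMapSlash]
          · simp [(by simp; exact fun h' => hc h'.symm : ('\\' == c) = false)]
            rw [ih _ _ (by simpa using Nat.le_of_succ_le_succ h)]
            simp [pvMapSlash, hc]

lemma pvReplace_eq (l : List Char) :
    PySem.Chars.replace l ['\\'] ['/'] = l.map pvMapSlash := by
  simp [PySem.Chars.replace, pvReplace_go l [] l.length (le_refl _)]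

lemma pvSplitOn_go (l cur : List Char) (acc : List (List Char)) (fuel : Nat)
    (h : l.length ≤ fuel) :
    PySem.Chars.splitOn.go ['/'] fuel l cur acc = acc.reverse ++ pvSplit1 l cur := by
  induction l generalizing cur acc fuel with
  | nil => cases fuel <;> simp [PySem.Chars.splitOn.go, pvSplit1]
  | cons c rest ih =>
      cases fuel with
      | zero => simp at h
      | succ fuel =>
          simp only [PySem.Chars.splitOn.go, List.isPrefixOf]
          by_cases hc : c = '/'
          · simp [hc, pvSplit1]
            rw [ih _ _ _ (by simpa using Nat.le_of_succ_le_succ h)]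
            simp
          · simp [(by simp; exact fun h' => hc h'.symm : ('/' == c) = false)]
            rw [ih _ _ _ (by simpa using Nat.le_of_succ_le_succ h)]
            simp [pvSplit1, hc]

lemma pvSplitOn_eq (l : List Char) :
    PySem.Chars.splitOn l ['/'] = pvSplit1 l [] := by
  simpa using pvSplitOn_go l [] [] (l.length + 1) (by omega)

lemma pvSplit1_ne_nil (l cur : List Char) : pvSplit1 l cur ≠ [] := by
  induction l generalizing cur with
  | nil => simp [pvSplit1]
  | cons c rest ih => by_cases hc : c = '/' <;> simp [pvSplit1, hc, ih]

lemma pvGetLast_split1 (l cur : List Char) :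
    (pvSplit1 (l.map pvMapSlash) cur).getLast? =
      some (l.foldl (fun file_name i => if i ≠ '/' ∧ i ≠ '\\' then file_name ++ [i] else []) cur.reverse) := by
  induction l generalizing cur with
  | nil => simp [pvSplit1]
  | cons c rest ih =>
      by_cases hc : pvMapSlash c = '/'
      · have hor : ¬ (c ≠ '/' ∧ c ≠ '\\') := by
          simp [pvMapSlash] at hc; by_cases h1 : c = '\\' <;> simp_all
        simp only [List.map_cons, pvSplit1, hc, if_true, List.foldl_cons, if_neg hor]
        obtain ⟨x, t, hx⟩ := List.exists_cons_of_ne_nil (pvSplit1_ne_nil (rest.map pvMapSlash) ([] : List Char))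
        rw [hx, List.getLast?_cons_cons, ← hx]
        simpa using ih []
      · have hkeep : c ≠ '/' ∧ c ≠ '\\' := by
          constructor <;> intro h <;> simp [pvMapSlash, h] at hc
        simp only [List.map_cons, pvSplit1, if_neg hc, List.foldl_cons, if_pos hkeep]
        have : pvMapSlash c = c := by simp [pvMapSlash, hkeep.2]
        rw [this]
        simpa using ih (c :: cur)

lemma pvPyGet_neg_one {α : Type} (l : List α) (h : l ≠ []) :
    PySem.List.pyGet? l (-1) = l.getLast? := by
  have hn : 1 ≤ l.length := List.length_pos_iff.mpr h
  simp [PySem.List.pyGet?, PySem.List.pyIdx?,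
        show (-(l.length:Int) ≤ -1) by omega, List.getLast?_eq_getElem?]

-- ===== VERDICT (by name: the statement is the Claim_ definition above) =====
theorem deal_dir_filename_spec : Claim_equal_deal_dir_filename := by
  intro name _
  unfold Spec_deal_dir_filename deal_dir_filename deal_dir_filename_alt
  simp only [pvReplace_eq, pvSplitOn_eq]
  rw [pvPyGet_neg_one _ (pvSplit1_ne_nil _ _), pvGetLast_split1]
  simp
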